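-- pv_equiv track=rewrite | github.com/genuinemerit/saskan-app | Saskantinon/saskan_report.py | get_ntype
-- ===== SOURCE A (Python) =====
-- def get_ntype(
--               p_N: dict,
--               p_node_nm: str):
--     """Return node type for a given node name.
--
--     :args:
--     - p_N (dict): additional nodes metadata for graph object
--     - p_title (str): Name of a schema/ontology, e.g. "scenes"
--     - p_node_nm (str): Node name.
--     """
--     node_type = None
--     for nt, nodes in p_N["name"].items():
--         if p_node_nm in nodes:
--             node_type = nt
--             break
--     return node_type
-- ===== SOURCE B (Python) =====
-- def get_ntype(
--               p_N: dict,
--               p_node_nm: str):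
--     """Return node type for a given node name (reverse-lookup table)."""
--     rev = {}
--     for nt, nodes in p_N["name"].items():
--         for node in nodes:
--             rev.setdefault(node, nt)
--     return rev.get(p_node_nm)
-- ===== Notes on version B (the rewrite author's own statement) =====
-- stated objective: alternative
-- what changed: Replaces the early-breaking scan over node lists with building a reverse node->type table via setdefault (first type wins) and a single dict lookup.
import Mathlib
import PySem

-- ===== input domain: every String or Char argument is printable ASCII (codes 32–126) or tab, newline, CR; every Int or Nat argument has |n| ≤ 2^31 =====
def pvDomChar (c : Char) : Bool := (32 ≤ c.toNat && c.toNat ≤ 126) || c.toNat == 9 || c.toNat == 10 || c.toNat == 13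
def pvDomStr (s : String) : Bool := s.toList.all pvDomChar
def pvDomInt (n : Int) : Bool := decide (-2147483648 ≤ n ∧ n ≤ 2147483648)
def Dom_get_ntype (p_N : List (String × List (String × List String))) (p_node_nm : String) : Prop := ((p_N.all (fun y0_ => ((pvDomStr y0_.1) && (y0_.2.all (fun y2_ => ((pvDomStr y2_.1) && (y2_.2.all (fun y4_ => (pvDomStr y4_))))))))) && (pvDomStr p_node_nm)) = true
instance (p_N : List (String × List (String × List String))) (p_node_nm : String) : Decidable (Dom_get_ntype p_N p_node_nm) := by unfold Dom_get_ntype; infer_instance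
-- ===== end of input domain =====

-- ===== PORT A =====
-- B builds a reverse node->type table (setdefault, so the first type wins) instead of A's
-- early-breaking membership scan; equal return value wherever A returns (Pre_ excludes the KeyError on a missing "name" key).
-- helper: A's for-loop with break over p_N["name"].items()
def pvFindType (items : List (String × List String)) (nm : String) : Option String :=
  match items with
  | [] => none
  | (nt, nodes) :: rest => if nm ∈ nodes then some nt else pvFindType rest nm

def get_ntype (p_N : List (String × List (String × List String))) (p_node_nm : String) : Option String :=
  match (PySem.Dict.mk p_N).get? "name" with
  | none => none      -- Python raises KeyError here; excluded by Pre_get_ntype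
  | some items => pvFindType items p_node_nm

-- ===== PORT B =====
def get_ntype_alt (p_N : List (String × List (String × List String))) (p_node_nm : String) : Option String :=
  match (PySem.Dict.mk p_N).get? "name" with
  | none => none      -- Python raises KeyError here; excluded by Pre_get_ntype
  | some items =>
    let rev : PySem.Dict String String :=
      items.foldl (fun d p => p.2.foldl (fun d' node => d'.setdefault node p.1) d) PySem.Dict.empty
    rev.get? p_node_nm

-- ===== PRECONDITION & SPEC =====
-- Pre_ excludes exactly the inputs whose outer dict has no "name" key, on which A raises KeyError (B too).
def Pre_get_ntype (p_N : List (String × List (String × List String))) (p_node_nm : String) : Prop :=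
  "name" ∈ p_N.map Prod.fst
instance (p_N : List (String × List (String × List String))) (p_node_nm : String) : Decidable (Pre_get_ntype p_N p_node_nm) := by unfold Pre_get_ntype; infer_instance
def pvWitness_get_ntype : (List (String × List (String × List String))) × String :=
  ([("name", [("t1", ["x", "a"]), ("t2", ["y"])])], "y")
def Spec_get_ntype (p_N : List (String × List (String × List String))) (p_node_nm : String) (out : Option String) : Prop := out = get_ntype_alt p_N p_node_nm
instance (p_N : List (String × List (String × List String))) (p_node_nm : String) (out : Option String) : Decidable (Spec_get_ntype p_N p_node_nm out) := by unfold Spec_get_ntype; infer_instance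

-- ===== CLAIM (what is proved, stated in full; the proofs are below) =====
def Claim_equal_get_ntype : Prop := ∀ (p_N : List (String × List (String × List String))) (p_node_nm : String), Dom_get_ntype p_N p_node_nm → Pre_get_ntype p_N p_node_nm → Spec_get_ntype p_N p_node_nm (get_ntype p_N p_node_nm)

-- ===== LEMMAS AND PROOFS =====

-- lookup after a general setdefault
theorem pv_get?_setdefault (d : PySem.Dict String String) (k k' v : String) :
    (d.setdefault k v).get? k' = if k' = k then some ((d.get? k).getD v) else d.get? k' := by
  by_cases hc : d.contains k
  · rw [PySem.Dict.setdefault_of_contains d v hc]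
    rw [PySem.Dict.contains_eq_isSome_get?] at hc
    cases hg : d.get? k with
    | none => rw [hg] at hc; simp at hc
    | some w => split_ifs with h <;> simp [h, hg]
  · have hc' : d.contains k = false := by simpa using hc
    rw [PySem.Dict.setdefault_of_not_contains d v hc']
    rw [PySem.Dict.get?_insert]
    have hg : d.get? k = none := by
      rw [PySem.Dict.contains_eq_isSome_get?] at hc'
      cases hg : d.get? k with
      | none => rfl
      | some w => rw [hg] at hc'; simp at hc'
    split_ifs with h <;> simp [h, hg]

-- inner loop: setdefault over one node list
theorem pv_inner (nodes : List String) (nt nm : String) (d : PySem.Dict String String) :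
    (nodes.foldl (fun d' node => d'.setdefault node nt) d).get? nm =
      match d.get? nm with
      | some v => some v
      | none => if nm ∈ nodes then some nt else none := by
  induction nodes generalizing d with
  | nil => cases hg : d.get? nm <;> simp [hg]
  | cons n rest ih =>
    simp only [List.foldl_cons]
    rw [ih]
    rw [pv_get?_setdefault]
    by_cases h : nm = n
    · subst h
      cases hg : d.get? nm <;> simp
    · simp only [if_neg h]
      cases hg : d.get? nm with
      | some v => simp
      | none =>
        simp only [List.mem_cons]
        have : (nm = n ∨ nm ∈ rest) ↔ nm ∈ rest := by
          constructor
          · rintro (rfl | hm); exact absurd rfl h; exact hm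
          · exact Or.inr
        rw [if_congr this rfl rfl]

-- outer loop: the reverse table's lookup is A's first-match scan
theorem pv_outer (items : List (String × List String)) (nm : String) (d : PySem.Dict String String) :
    (items.foldl (fun d p => p.2.foldl (fun d' node => d'.setdefault node p.1) d) d).get? nm =
      match d.get? nm with
      | some v => some v
      | none => pvFindType items nm := by
  induction items generalizing d with
  | nil => cases hg : d.get? nm <;> simp [hg, pvFindType]
  | cons p rest ih =>
    simp only [List.foldl_cons]
    rw [ih, pv_inner]
    cases hg : d.get? nm with
    | some v => simp
    | none =>
      simp only [pvFindType]
      by_cases h : nm ∈ p.2 <;> simp [h]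

-- ===== VERDICT (by name: the statement is the Claim_ definition above) =====
theorem get_ntype_spec : Claim_equal_get_ntype := by
  intro p_N p_node_nm _ _
  unfold Spec_get_ntype get_ntype get_ntype_alt
  cases h : (PySem.Dict.mk p_N).get? "name" with
  | none => simp
  | some items =>
    simp only []
    rw [pv_outer]
    simp [PySem.Dict.get?_empty]
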